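-- pv_equiv track=rewrite | github.com/KhayaleevT/Encryption_2 | encrypt.py | _vernam
-- ===== SOURCE A (Python) =====
-- MIN_ORD = 32
--
-- def _vernam_xor(ch: chr, xor_ch: chr) -> chr:
--     """
--     Args:
--         ch,xor_ch -chars to be xored
--     Returns:
--         xor of two chars ords for vernam encoding
--     """
--     xor_1 = ord(ch) - MIN_ORD
--     xor_2 = ord(xor_ch) - MIN_ORD
--     return chr((xor_1 ^ xor_2) + MIN_ORD)
--
-- def _vernam(file, key: str) -> str:
--     """
--        Args:
--             file: text to be encoded
--             key(str): key, should be at least the size of encoding file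
--        Returns:
--              str: encoded text
--     """
--     ans = []
--     ch_num = 0
--     for line in file:
--         for ch in line:
--             if ord(ch) < MIN_ORD:
--                 ans.append(ch)
--                 continue
--             _shift_chr = key[ch_num]
--             ch_num += 1
--             ans.append(_vernam_xor(ch, _shift_chr))
--     return ''.join(ans)
-- ===== SOURCE B (Python) =====
-- MIN_ORD = 32
--
-- def _vernam(file, key: str) -> str:
--     # index-table decomposition: flatten, collect active positions, then patch a copy
--     chars = [ch for line in file for ch in line]
--     positions = [i for i, ch in enumerate(chars) if ord(ch) >= MIN_ORD]
--     result = list(chars)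
--     for k, pos in enumerate(positions):
--         result[pos] = chr(((ord(chars[pos]) - MIN_ORD) ^ (ord(key[k]) - MIN_ORD)) + MIN_ORD)
--     return ''.join(result)
-- ===== Notes on version B (the rewrite author's own statement) =====
-- stated objective: alternative
-- what changed: A threads a key counter through one stateful scan over nested line/char loops; B flattens the file, builds an index table of the positions of active (ord >= 32) characters in one pass, then patches a copy of the character list by assigning the k-th key character at the k-th collected position.
-- outside the precondition, e.g. on _vernam([' '], '\t'): A returns '\t', B returns '\t'; on _vernam(['a'], '\t'): A raises ValueError, B raises ValueError; on _vernam(['ab'], 'x'): A raises IndexError, B raises IndexError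
import Mathlib
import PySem

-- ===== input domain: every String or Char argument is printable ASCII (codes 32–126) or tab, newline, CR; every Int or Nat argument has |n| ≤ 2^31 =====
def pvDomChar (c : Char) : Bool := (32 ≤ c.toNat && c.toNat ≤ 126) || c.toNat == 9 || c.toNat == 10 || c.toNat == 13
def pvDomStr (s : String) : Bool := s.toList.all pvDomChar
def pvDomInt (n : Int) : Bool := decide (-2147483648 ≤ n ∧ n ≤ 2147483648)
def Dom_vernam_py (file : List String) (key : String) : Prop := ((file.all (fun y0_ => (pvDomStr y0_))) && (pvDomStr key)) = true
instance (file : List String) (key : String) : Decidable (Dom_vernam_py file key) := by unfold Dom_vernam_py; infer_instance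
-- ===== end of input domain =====

-- B replaces A's single stateful key-counter scan by an index-table decomposition
-- (flatten, collect active positions, patch a copy); objective: alternative, same cost.
-- ===== PORT A =====
def vernamXor (ch xorCh : Char) : Char :=
  -- chr((xor_1 ^ xor_2) + 32); exact when the argument of chr is a valid code point
  let xor1 : Int := (ch.toNat : Int) - 32
  let xor2 : Int := (xorCh.toNat : Int) - 32
  Char.ofNat ((PySem.Int.bxor xor1 xor2 + 32).toNat)

def vernam_py (file : List String) (key : String) : String :=
  -- ans/ch_num state threaded through the two nested loops; key[ch_num] via pyGetD
  String.ofList (file.foldl (fun (st : List Char × Nat) line =>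
    line.toList.foldl (fun st ch =>
      if ch.toNat < 32 then (st.1 ++ [ch], st.2)
      else (st.1 ++ [vernamXor ch (PySem.List.pyGetD key.toList (st.2 : Int) ' ')], st.2 + 1)) st)
    ([], 0)).1

-- ===== PORT B =====
def vernamXorAlt (ch xorCh : Char) : Char :=
  -- B's inline chr(((ord(chars[pos]) - 32) ^ (ord(key[k]) - 32)) + 32)
  Char.ofNat ((PySem.Int.bxor ((ch.toNat : Int) - 32) ((xorCh.toNat : Int) - 32) + 32).toNat)

def vernam_py_alt (file : List String) (key : String) : String :=
  -- chars = flattened file; positions = index table of active chars; patch a copy of chars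
  String.ofList
    ((PySem.List.enumerate
        ((((PySem.List.enumerate (file.flatMap String.toList) 0).filter
            (fun p => 32 ≤ p.2.toNat)).map (·.1))) 0).foldl
      (fun r kp =>
        PySem.List.pySetD r kp.2
          (vernamXorAlt (PySem.List.pyGetD (file.flatMap String.toList) kp.2 ' ')
            (PySem.List.pyGetD key.toList kp.1 ' ')))
      (file.flatMap String.toList))

-- ===== PRECONDITION & SPEC =====
-- Pre_ excludes inputs where A raises IndexError (key shorter than the number of
-- characters with ord >= 32), and keys whose consumed prefix contains a control
-- character (tab/newline/CR), on which A's chr(xor+32) usually raises ValueError and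
-- on the remaining corner returns a control character via a negative xor.
def Pre_vernam_py (file : List String) (key : String) : Prop :=
  (file.flatMap String.toList).countP (fun c => 32 ≤ c.toNat) ≤ key.toList.length ∧
  ((key.toList.take ((file.flatMap String.toList).countP (fun c => 32 ≤ c.toNat))).all
    (fun c => 32 ≤ c.toNat)) = true
instance (file : List String) (key : String) : Decidable (Pre_vernam_py file key) := by
  unfold Pre_vernam_py; infer_instance

def pvWitness_vernam_py : List String × String := (["ab", "c d"], "vwxyz")

def Spec_vernam_py (file : List String) (key : String) (out : String) : Prop := out = vernam_py_alt file key
instance (file : List String) (key : String) (out : String) : Decidable (Spec_vernam_py file key out) := by unfold Spec_vernam_py; infer_instance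

-- ===== CLAIM (what is proved, stated in full; the proofs are below) =====
def Claim_equal_vernam_py : Prop := ∀ (file : List String) (key : String), Dom_vernam_py file key → Pre_vernam_py file key → Spec_vernam_py file key (vernam_py file key)

-- ===== LEMMAS AND PROOFS =====

-- common reference: the per-character recursion both ports compute
def goV (kl : List Char) : List Char → Nat → List Char
  | [], _ => []
  | c :: t, n =>
      if c.toNat < 32 then c :: goV kl t n
      else vernamXor c (PySem.List.pyGetD kl (n : Int) ' ') :: goV kl t (n + 1)

-- ---- A side ----
theorem foldA (kl : List Char) (cs : List Char) : ∀ (acc : List Char) (n : Nat),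
    cs.foldl (fun (st : List Char × Nat) ch =>
      if ch.toNat < 32 then (st.1 ++ [ch], st.2)
      else (st.1 ++ [vernamXor ch (PySem.List.pyGetD kl (st.2 : Int) ' ')], st.2 + 1))
      (acc, n)
    = (acc ++ goV kl cs n, n + cs.countP (fun c => decide (32 ≤ c.toNat))) := by
  induction cs with
  | nil => intro acc n; simp [goV]
  | cons c t ih =>
      intro acc n
      by_cases h : c.toNat < 32
      · simp only [List.foldl_cons, if_pos h]
        rw [ih (acc ++ [c]) n]
        simp [goV, h, Nat.not_le.mpr h]
      · have h' : 32 ≤ c.toNat := Nat.not_lt.mp h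
        simp only [List.foldl_cons, if_neg h]
        rw [ih (acc ++ [vernamXor c (PySem.List.pyGetD kl (n : Int) ' ')]) (n + 1)]
        simp only [goV, if_neg h, List.countP_cons, h', decide_true, List.append_assoc,
          List.singleton_append, Prod.mk.injEq]
        exact ⟨trivial, by simp; omega⟩

theorem vernam_py_eq_goV (file : List String) (key : String) :
    vernam_py file key = String.ofList (goV key.toList (file.flatMap String.toList) 0) := by
  unfold vernam_py
  have hflat : (file.flatMap String.toList).foldl
      (fun (st : List Char × Nat) ch =>
        if ch.toNat < 32 then (st.1 ++ [ch], st.2)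
        else (st.1 ++ [vernamXor ch (PySem.List.pyGetD key.toList (st.2 : Int) ' ')], st.2 + 1))
      ([], 0)
      = file.foldl (fun (st : List Char × Nat) line =>
          line.toList.foldl (fun st ch =>
            if ch.toNat < 32 then (st.1 ++ [ch], st.2)
            else (st.1 ++ [vernamXor ch (PySem.List.pyGetD key.toList (st.2 : Int) ' ')], st.2 + 1)) st)
          ([], 0) := by
    rw [List.foldl_flatMap]
  rw [← hflat, foldA key.toList]
  simp

-- ---- B side ----
theorem vernamXorAlt_eq (a b : Char) : vernamXorAlt a b = vernamXor a b := rfl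

-- the position table of a suffix starting at absolute index m
def posTab : List Char → Int → List Int
  | [], _ => []
  | c :: t, m => if 32 ≤ c.toNat then m :: posTab t (m + 1) else posTab t (m + 1)

theorem posTab_eq (cs : List Char) : ∀ (m : Int),
    ((PySem.List.enumerate cs m).filter (fun p => 32 ≤ p.2.toNat)).map (·.1) = posTab cs m := by
  induction cs with
  | nil => intro m; simp [posTab, PySem.List.enumerate_nil]
  | cons c t ih =>
      intro m
      by_cases h : 32 ≤ c.toNat <;>
        simp [posTab, PySem.List.enumerate_cons, h, ih]

theorem set_append_cons {α : Type} (pre : List α) (c : α) (t : List α) (v : α) :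
    (pre ++ c :: t).set pre.length v = pre ++ v :: t := by
  induction pre with
  | nil => rfl
  | cons x xs ih => simp [ih]

theorem foldB (kl full : List Char) : ∀ (suf pre : List Char) (k : Nat),
    (∀ j, j < suf.length → full[pre.length + j]? = suf[j]?) →
    (PySem.List.enumerate (posTab suf (pre.length : Int)) (k : Int)).foldl
      (fun r kp =>
        PySem.List.pySetD r kp.2
          (vernamXorAlt (PySem.List.pyGetD full kp.2 ' ') (PySem.List.pyGetD kl kp.1 ' ')))
      (pre ++ suf)
    = pre ++ goV kl suf k := by
  intro suf
  induction suf with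
  | nil => intro pre k _; simp [posTab, goV, PySem.List.enumerate_nil]
  | cons c t ih =>
      intro pre k hfull
      have hc0 : full[pre.length]? = some c := by
        have := hfull 0 (by simp); simpa using this
      have hrest : ∀ j, j < t.length → full[(pre ++ [c]).length + j]? = t[j]? := by
        intro j hj
        have := hfull (j + 1) (by simp; omega)
        simpa [Nat.add_comm, Nat.add_assoc, Nat.add_left_comm] using this
      by_cases h : 32 ≤ c.toNat
      · -- active position: first write patches index pre.length, then recurse
        have hgetfull : PySem.List.pyGetD full ((pre.length : Nat) : Int) ' ' = c := by
          rw [PySem.List.pyGetD_natCast]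
          simp [List.getD_eq_getElem?_getD, hc0]
        have hset : PySem.List.pySetD (pre ++ c :: t) ((pre.length : Nat) : Int)
            (vernamXorAlt c (PySem.List.pyGetD kl (k : Int) ' '))
            = pre ++ vernamXorAlt c (PySem.List.pyGetD kl (k : Int) ' ') :: t := by
          rw [PySem.List.pySetD_natCast, set_append_cons]
        simp only [posTab, h, if_pos, PySem.List.enumerate_cons, List.foldl_cons]
        rw [hgetfull, hset]
        have := ih (pre ++ [vernamXorAlt c (PySem.List.pyGetD kl (k : Int) ' ')]) (k + 1)
          (by simpa using hrest)
        simp only [List.append_assoc, List.singleton_append, List.length_append,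
          List.length_cons, List.length_nil] at this ⊢
        rw [show ((k : Int) + 1) = ((k + 1 : Nat) : Int) by push_cast; ring,
            show ((pre.length : Int) + 1) = ((pre.length + 1 : Nat) : Int) by push_cast; ring]
        rw [this]
        have hxa : vernamXorAlt c (PySem.List.pyGetD kl (k : Int) ' ')
            = vernamXor c (PySem.List.pyGetD kl (k : Int) ' ') := rfl
        simp [goV, Nat.not_lt.mpr h, vernamXorAlt_eq]
      · -- control character: no write, it stays in place
        have hpt : posTab (c :: t) (pre.length : Int) = posTab t ((pre.length : Int) + 1) := by
          simp [posTab, h]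
        rw [hpt, show (pre ++ c :: t) = ((pre ++ [c]) ++ t) by simp]
        rw [show ((pre.length : Int) + 1) = (((pre ++ [c]).length : Nat) : Int) by simp]
        rw [ih (pre ++ [c]) k hrest]
        have hc : c.toNat < 32 := by omega
        simp [goV, hc]

theorem vernam_py_alt_eq_goV (file : List String) (key : String) :
    vernam_py_alt file key = String.ofList (goV key.toList (file.flatMap String.toList) 0) := by
  unfold vernam_py_alt
  rw [posTab_eq]
  have h := foldB key.toList (file.flatMap String.toList) (file.flatMap String.toList) [] 0
    (by intro j hj; simp)
  simp only [List.nil_append, List.length_nil, Nat.cast_zero] at h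
  exact congrArg String.ofList h

-- ===== VERDICT (by name: the statement is the Claim_ definition above) =====
theorem vernam_py_spec : Claim_equal_vernam_py := by
  intro file key _ _
  unfold Spec_vernam_py
  rw [vernam_py_eq_goV, vernam_py_alt_eq_goV]
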